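-- pv_equiv track=rewrite | github.com/bryanhann/prj.translate | project/lib/local/couplet/__init__.py | rawcouplets_4_lines
-- ===== SOURCE A (Python) =====
-- def rawcouplets_4_lines(lines):
--     acc=[[]]
--     for line in lines:
--         if line.startswith('<E>'):
--             acc.append( [] )
--         acc[-1].append(line)
--     rawcouplets = [ ''.join(xx) for xx in acc ]
--     return rawcouplets
-- ===== SOURCE B (Python) =====
-- def rawcouplets_4_lines(lines):
--     lines = list(lines)
--     boundaries = [i for i, l in enumerate(lines) if l.startswith('<E>')]
--     starts = [0] + boundaries
--     ends = boundaries + [len(lines)]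
--     return [''.join(lines[s:e]) for s, e in zip(starts, ends)]
-- ===== Notes on version B (the rewrite author's own statement) =====
-- stated objective: alternative
-- what changed: B first computes the list of indices of '<E>' marker lines and then produces each couplet by slicing between consecutive cut points, instead of A's single pass appending into a growing list of lists.
import Mathlib
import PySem

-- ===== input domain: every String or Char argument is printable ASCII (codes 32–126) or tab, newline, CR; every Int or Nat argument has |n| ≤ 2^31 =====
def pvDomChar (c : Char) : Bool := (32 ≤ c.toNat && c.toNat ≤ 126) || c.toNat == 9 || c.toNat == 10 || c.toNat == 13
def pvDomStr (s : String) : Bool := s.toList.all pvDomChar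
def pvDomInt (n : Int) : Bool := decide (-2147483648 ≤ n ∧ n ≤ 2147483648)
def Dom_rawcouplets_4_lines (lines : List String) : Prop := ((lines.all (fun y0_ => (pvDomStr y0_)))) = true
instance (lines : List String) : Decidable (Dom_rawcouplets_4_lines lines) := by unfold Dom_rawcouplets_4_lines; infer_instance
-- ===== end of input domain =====

-- B groups lines by first indexing the '<E>' cut points and slicing between consecutive
-- cut points, instead of A's one-pass append-into-last-group accumulator; same cost.

-- ===== PORT A =====
-- the loop body: acc[-1].append(line) on the always-nonempty acc = replace the last group by itself ++ [line]
def pvStepA (acc : List (List String)) (line : String) : List (List String) :=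
  let acc := if PySem.Str.startswith line "<E>" then acc ++ [[]] else acc
  acc.dropLast ++ [acc.getLastD [] ++ [line]]

def rawcouplets_4_lines (lines : List String) : List String :=
  let acc : List (List String) := lines.foldl pvStepA [[]]
  acc.map (fun xx => PySem.Str.join "" xx)

-- ===== PORT B =====
def rawcouplets_4_lines_alt (lines : List String) : List String :=
  let boundaries : List Int :=
    (PySem.List.enumerate lines).filterMap
      (fun il => if PySem.Str.startswith il.2 "<E>" then some il.1 else none)
  let starts := (0 : Int) :: boundaries
  let ends := boundaries ++ [(lines.length : Int)]
  (starts.zip ends).map (fun se =>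
    PySem.Str.join "" (PySem.List.slice lines (some se.1) (some se.2)))

-- ===== PRECONDITION & SPEC =====
def Spec_rawcouplets_4_lines (lines : List String) (out : List String) : Prop := out = rawcouplets_4_lines_alt lines
instance (lines : List String) (out : List String) : Decidable (Spec_rawcouplets_4_lines lines out) := by unfold Spec_rawcouplets_4_lines; infer_instance

-- ===== CLAIM (what is proved, stated in full; the proofs are below) =====
def Claim_equal_rawcouplets_4_lines : Prop := ∀ (lines : List String), Dom_rawcouplets_4_lines lines → Spec_rawcouplets_4_lines lines (rawcouplets_4_lines lines)

-- ===== LEMMAS AND PROOFS =====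

-- reference grouping: the list of couplet groups, recursively from the left
def pvG : List String → List (List String)
  | [] => [[]]
  | l :: ls =>
    match pvG ls with
    | [] => [[]]  -- unreachable
    | g0 :: gs =>
      if PySem.Str.startswith l "<E>" then [] :: (l :: g0) :: gs else (l :: g0) :: gs

def pvAttach (g : List String) : List (List String) → List (List String)
  | [] => []
  | g0 :: gs => (g ++ g0) :: gs

theorem pvG_ne_nil (ls : List String) : pvG ls ≠ [] := by
  cases ls with
  | nil => simp [pvG]
  | cons l ls =>
    simp only [pvG]
    rcases h : pvG ls with _ | ⟨g0, gs⟩ <;> split <;> (try split_ifs) <;> simp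

theorem pvStepA_concat (acc : List (List String)) (g : List String) (l : String) :
    pvStepA (acc ++ [g]) l
      = if PySem.Str.startswith l "<E>" then (acc ++ [g]) ++ [[l]] else acc ++ [g ++ [l]] := by
  unfold pvStepA
  cases hm : PySem.Str.startswith l "<E>" with
  | false =>
    simp only [Bool.false_eq_true, if_false]
    simp
  | true =>
    simp only [if_true]
    simp

-- A-side invariant
theorem pvA_fold (lines : List String) : ∀ (acc : List (List String)) (g : List String),
    lines.foldl pvStepA (acc ++ [g]) = acc ++ pvAttach g (pvG lines) := by
  induction lines with
  | nil => intro acc g; simp [pvG, pvAttach]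
  | cons l ls ih =>
    intro acc g
    rcases h : pvG ls with _ | ⟨g0, gs⟩
    · exact absurd h (pvG_ne_nil ls)
    rw [List.foldl_cons, pvStepA_concat]
    cases hm : PySem.Str.startswith l "<E>" with
    | true =>
      simp only [if_true]
      rw [ih (acc ++ [g]) [l]]
      simp only [pvG, h, hm, if_true, pvAttach, List.append_assoc]
      simp
    | false =>
      simp only [Bool.false_eq_true, if_false]
      rw [ih acc (g ++ [l])]
      simp only [pvG, h, hm, Bool.false_eq_true, if_false, pvAttach, List.append_assoc]
      simp

theorem pvA_eq_G (lines : List String) :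
    rawcouplets_4_lines lines = (pvG lines).map (fun xx => PySem.Str.join "" xx) := by
  unfold rawcouplets_4_lines
  have h0 := pvA_fold lines [] []
  simp only [List.nil_append] at h0
  rw [h0]
  rcases h : pvG lines with _ | ⟨g0, gs⟩
  · exact absurd h (pvG_ne_nil lines)
  · simp [pvAttach]

-- B side: the marker indices, as naturals
def pvNatB : List String → List Nat
  | [] => []
  | l :: ls =>
    (if PySem.Str.startswith l "<E>" then [0] else []) ++ (pvNatB ls).map (· + 1)

theorem pvEnum_shift {α : Type} (xs : List α) : ∀ (s : Int),
    PySem.List.enumerate xs (s + 1) = (PySem.List.enumerate xs s).map (fun p => (p.1 + 1, p.2)) := by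
  induction xs with
  | nil => intro s; simp [PySem.List.enumerate_nil]
  | cons x xs ih =>
    intro s
    rw [PySem.List.enumerate_cons, PySem.List.enumerate_cons, List.map_cons, ih (s + 1)]

theorem pvBounds_eq (lines : List String) :
    (PySem.List.enumerate lines).filterMap
      (fun il => if PySem.Str.startswith il.2 "<E>" then some il.1 else none)
    = (pvNatB lines).map (fun n : Nat => (n : Int)) := by
  induction lines with
  | nil => simp [PySem.List.enumerate_nil, pvNatB]
  | cons l ls ih =>
    rw [PySem.List.enumerate_cons, List.filterMap_cons, pvEnum_shift ls 0, List.filterMap_map]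
    have key : List.filterMap
        ((fun il : Int × String => if PySem.Str.startswith il.2 "<E>" then some il.1 else none)
          ∘ (fun p : Int × String => (p.1 + 1, p.2))) (PySem.List.enumerate ls 0)
        = ((PySem.List.enumerate ls 0).filterMap
            (fun il => if PySem.Str.startswith il.2 "<E>" then some il.1 else none)).map (· + 1) := by
      rw [List.map_filterMap]
      apply List.filterMap_congr
      intro p _
      by_cases hp : PySem.Str.startswith p.2 "<E>" = true
      · have hp' : PySem.Chars.startswith p.2.toList ['<', 'E', '>'] = true := by simpa using hp
        simp [hp', Function.comp]
      · have hp' : PySem.Chars.startswith p.2.toList ['<', 'E', '>'] = false := by simpa using hp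
        simp [hp', Function.comp]
    rw [key, ih, List.map_map]
    cases hm : PySem.Str.startswith l "<E>" with
    | true =>
      simp only [pvNatB, hm, if_true, List.singleton_append, List.map_cons, List.map_map]
      refine congrArg (fun t => (0 : Int) :: t) ?_
      apply List.map_congr_left
      intro n _
      simp [Function.comp]
    | false =>
      simp only [pvNatB, hm, Bool.false_eq_true, if_false, List.nil_append, List.map_map]
      apply List.map_congr_left
      intro n _
      simp [Function.comp]

-- shifting every cut point by one drops the list head from every slice
theorem pvZipShift (ls : List String) (l : String) : ∀ (u v : List Nat),
    ((u.map (· + 1)).zip (v.map (· + 1))).map (fun p => ((l :: ls).drop p.1).take (p.2 - p.1))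
    = (u.zip v).map (fun p => (ls.drop p.1).take (p.2 - p.1)) := by
  intro u
  induction u with
  | nil => intro v; simp
  | cons a u ih =>
    intro v
    cases v with
    | nil => simp
    | cons b v =>
      simp only [List.map_cons, List.zip_cons_cons, List.map_cons, ih]
      simp [Nat.succ_sub_succ, List.drop_succ_cons]

theorem pvS (s t : List Nat) (l : String) (ls : List String) :
    ((0 :: s.map (· + 1)).zip ((s ++ t).map (· + 1))).map (fun p => ((l :: ls).drop p.1).take (p.2 - p.1))
    = pvAttach [l] (((0 :: s).zip (s ++ t)).map (fun p => (ls.drop p.1).take (p.2 - p.1))) := by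
  cases s with
  | nil =>
    cases t with
    | nil => simp [pvAttach]
    | cons b t => simp [pvAttach]
  | cons a s =>
    simp only [List.map_cons, List.cons_append, List.zip_cons_cons, List.map_cons]
    rw [show ((a + 1) :: s.map (· + 1)) = (a :: s).map (· + 1) from by simp,
        pvZipShift ls l (a :: s) (s ++ t)]
    simp [pvAttach]

theorem pvB_nat (lines : List String) :
    ((0 :: pvNatB lines).zip (pvNatB lines ++ [lines.length])).map
      (fun p => (lines.drop p.1).take (p.2 - p.1))
    = pvG lines := by
  induction lines with
  | nil => simp [pvNatB, pvG]
  | cons l ls ih =>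
    rcases h : pvG ls with _ | ⟨g0, gs⟩
    · exact absurd h (pvG_ne_nil ls)
    cases hm : PySem.Str.startswith l "<E>" with
    | true =>
      simp only [pvNatB, hm, if_true, List.singleton_append, List.length_cons]
      rw [show ((0 :: (pvNatB ls).map (· + 1)) ++ [ls.length + 1])
            = 0 :: ((pvNatB ls ++ [ls.length]).map (· + 1)) from by simp]
      simp only [List.zip_cons_cons, List.map_cons]
      rw [pvS (pvNatB ls) [ls.length] l ls, ih, h]
      have hm' : PySem.Chars.startswith l.toList ['<', 'E', '>'] = true := by simpa using hm
      simp [pvG, h, hm', pvAttach]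
    | false =>
      simp only [pvNatB, hm, Bool.false_eq_true, if_false, List.nil_append, List.length_cons]
      rw [show ((pvNatB ls).map (· + 1) ++ [ls.length + 1])
            = (pvNatB ls ++ [ls.length]).map (· + 1) from by simp]
      rw [pvS (pvNatB ls) [ls.length] l ls, ih, h]
      have hm' : PySem.Chars.startswith l.toList ['<', 'E', '>'] = false := by simpa using hm
      simp [pvG, h, hm', pvAttach]

theorem pvB_eq_G (lines : List String) :
    rawcouplets_4_lines_alt lines = (pvG lines).map (fun xx => PySem.Str.join "" xx) := by
  simp only [rawcouplets_4_lines_alt]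
  rw [pvBounds_eq]
  rw [show ((0 : Int) :: (pvNatB lines).map (fun n : Nat => (n : Int)))
        = ((0 :: pvNatB lines).map (fun n : Nat => (n : Int))) from by simp,
      show ((pvNatB lines).map (fun n : Nat => (n : Int)) ++ [(lines.length : Int)])
        = ((pvNatB lines ++ [lines.length]).map (fun n : Nat => (n : Int))) from by simp,
      List.zip_map, List.map_map, ← pvB_nat lines, List.map_map]
  apply List.map_congr_left
  intro p _
  simp [Function.comp, Prod.map, PySem.List.slice_natCast]

-- ===== VERDICT (by name: the statement is the Claim_ definition above) =====
theorem rawcouplets_4_lines_spec : Claim_equal_rawcouplets_4_lines := by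
  intro lines _
  unfold Spec_rawcouplets_4_lines
  rw [pvA_eq_G, pvB_eq_G]
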